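-- pv_equiv track=rewrite | github.com/MarcioMolina/fatec-scs-fdw-2025-2-Tecguard | backend_py/back_firewall.py | _is_malicious_user_agent
-- ===== SOURCE A (Python) =====
-- def _is_malicious_user_agent(user_agent):
--     """Verifica User-Agents maliciosos"""
--     malicious_agents = [
--         "sqlmap", "nmap", "metasploit",
--         "nikto", "wget", "curl", "havij",
--         "hydra", "nessus", "burp", "zap",
--         "w3af", "arachni", "skipfish"
--     ]
--     return any(agent in user_agent.lower() for agent in malicious_agents)
-- ===== SOURCE B (Python) =====
-- def _is_malicious_user_agent(user_agent):
--     """Verifica User-Agents maliciosos (single left-to-right scan over positions)"""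
--     malicious_agents = [
--         "sqlmap", "nmap", "metasploit",
--         "nikto", "wget", "curl", "havij",
--         "hydra", "nessus", "burp", "zap",
--         "w3af", "arachni", "skipfish"
--     ]
--     s = user_agent.lower()
--     for i in range(len(s)):
--         for agent in malicious_agents:
--             if s.startswith(agent, i):
--                 return True
--     return False
-- ===== Notes on version B (the rewrite author's own statement) =====
-- stated objective: alternative
-- what changed: Instead of 14 independent membership substring searches over the lowered string, B lowers the string once and makes a single left-to-right scan over positions, testing at each position whether any of the 14 patterns starts there via str.startswith with an offset.
import Mathlib
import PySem

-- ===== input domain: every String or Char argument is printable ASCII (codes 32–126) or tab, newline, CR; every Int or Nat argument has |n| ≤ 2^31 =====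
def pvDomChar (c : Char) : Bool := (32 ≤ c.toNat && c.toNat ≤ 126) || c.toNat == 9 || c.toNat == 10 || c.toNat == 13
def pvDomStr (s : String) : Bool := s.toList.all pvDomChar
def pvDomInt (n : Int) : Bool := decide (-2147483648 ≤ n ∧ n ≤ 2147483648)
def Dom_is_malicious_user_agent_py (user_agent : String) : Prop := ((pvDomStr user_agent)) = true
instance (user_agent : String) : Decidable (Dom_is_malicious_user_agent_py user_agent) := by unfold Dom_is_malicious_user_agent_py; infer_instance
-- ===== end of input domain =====

-- B replaces A's 14 independent substring tests by one left-to-right scan over positions,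
-- checking at each position whether any pattern starts there (alternative traversal, same cost class).


-- ===== PORT A =====
-- any(agent in user_agent.lower() for agent in malicious_agents)
def is_malicious_user_agent_py (user_agent : String) : Bool :=
  let malicious_agents : List String :=
    ["sqlmap", "nmap", "metasploit",
     "nikto", "wget", "curl", "havij",
     "hydra", "nessus", "burp", "zap",
     "w3af", "arachni", "skipfish"]
  malicious_agents.any (fun agent => PySem.Str.isIn agent (PySem.Str.lower user_agent))

-- ===== PORT B =====
-- s = user_agent.lower(); for i in range(len(s)): for agent in ...: if s.startswith(agent, i): return True
def is_malicious_user_agent_py_alt (user_agent : String) : Bool :=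
  let malicious_agents : List (List Char) :=
    ["sqlmap".toList, "nmap".toList, "metasploit".toList,
     "nikto".toList, "wget".toList, "curl".toList, "havij".toList,
     "hydra".toList, "nessus".toList, "burp".toList, "zap".toList,
     "w3af".toList, "arachni".toList, "skipfish".toList]
  let s := (PySem.Str.lower user_agent).toList
  (List.range s.length).any (fun i =>
    malicious_agents.any (fun agent => PySem.Chars.startswith (s.drop i) agent))

-- ===== PRECONDITION & SPEC =====
def Spec_is_malicious_user_agent_py (user_agent : String) (out : Bool) : Prop := out = is_malicious_user_agent_py_alt user_agent
instance (user_agent : String) (out : Bool) : Decidable (Spec_is_malicious_user_agent_py user_agent out) := by unfold Spec_is_malicious_user_agent_py; infer_instance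

-- ===== CLAIM (what is proved, stated in full; the proofs are below) =====
def Claim_equal_is_malicious_user_agent_py : Prop := ∀ (user_agent : String), Dom_is_malicious_user_agent_py user_agent → Spec_is_malicious_user_agent_py user_agent (is_malicious_user_agent_py user_agent)

-- ===== LEMMAS AND PROOFS =====

-- 'sub in s' holds iff some position strictly below s.length has sub as a prefix of the suffix there,
-- provided sub is nonempty (all 14 patterns are).
theorem pv_isIn_iff_exists_lt {sub s : List Char} (hsub : sub ≠ []) :
    PySem.Chars.isIn sub s = true ↔ ∃ i < s.length, sub <+: s.drop i := by
  rw [← PySem.Chars.exists_prefix_drop_iff_isIn]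
  constructor
  · rintro ⟨j, hj⟩
    by_cases h : j < s.length
    · exact ⟨j, h, hj⟩
    · exfalso
      have : s.drop j = [] := List.drop_eq_nil_of_le (le_of_not_gt h)
      rw [this, List.prefix_nil] at hj
      exact hsub hj
  · rintro ⟨i, _, hi⟩
    exact ⟨i, hi⟩

-- ===== VERDICT (by name: the statement is the Claim_ definition above) =====
theorem is_malicious_user_agent_py_spec : Claim_equal_is_malicious_user_agent_py := by
  intro user_agent _
  unfold Spec_is_malicious_user_agent_py is_malicious_user_agent_py is_malicious_user_agent_py_alt
  rw [Bool.eq_iff_iff]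
  simp only [List.any_eq_true, List.mem_range, PySem.Chars.startswith_iff,
    PySem.Str.isIn_eq, PySem.Str.toList_lower]
  constructor
  · rintro ⟨agent, hmem, hin⟩
    have hne : agent.toList ≠ [] := by
      fin_cases hmem <;> decide
    obtain ⟨i, hilt, hpre⟩ := (pv_isIn_iff_exists_lt hne).mp hin
    exact ⟨i, hilt, agent.toList, by fin_cases hmem <;> simp, hpre⟩
  · rintro ⟨i, hilt, agent, hmem, hpre⟩
    fin_cases hmem <;>
      exact ⟨_, by simp, (pv_isIn_iff_exists_lt (by decide)).mpr ⟨i, hilt, hpre⟩⟩
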